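-- pv_equiv track=rewrite | github.com/brooke-lampe/soft160-recursion-lab | lab.py | maximal_repetition_free_prefix
-- ===== SOURCE A (Python) =====
-- def maximal_repetition_free_prefix(sequence):
--     """
--     Given a sequence, return its longest repetition-free prefix.  For example:
--
--     >>> maximal_repetition_free_prefix([])
--     []
--     >>> maximal_repetition_free_prefix([5])
--     [5]
--     >>> maximal_repetition_free_prefix([5, 4])
--     [5, 4]
--     >>> maximal_repetition_free_prefix([5, 5])
--     [5]
--     >>> maximal_repetition_free_prefix([5, 4, 5])
--     [5, 4]
--     >>> maximal_repetition_free_prefix([5, 4, 5, 3])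
--     [5, 4]
--     >>> maximal_repetition_free_prefix([3, 2, 1, 2, 4])
--     [3, 2, 1]
--
--     """
--
--     n = len(sequence)
--     if n == 0 or n == 1:
--         return sequence
--     if n == 2:
--         if sequence[0] != sequence[1]:
--             return sequence
--         return sequence[0:1]
--     for i in range(0, n):
--         for j in range(0, n):
--             if i != j and sequence[i] == sequence[j]:
--                 return maximal_repetition_free_prefix(sequence[0:n - 1])
--     return sequence
-- ===== SOURCE B (Python) =====
-- def maximal_repetition_free_prefix(sequence):
--     prefix = []
--     for x in sequence:
--         if x in prefix:
--             break
--         prefix.append(x)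
--     return prefix
-- ===== Notes on version B (the rewrite author's own statement) =====
-- stated objective: faster
-- what changed: Replaces A's repeated all-pairs duplicate scan plus recursion on ever-shorter prefixes with a single left-to-right pass that stops at the first element already seen and returns the prefix accumulated so far.
import Mathlib
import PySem

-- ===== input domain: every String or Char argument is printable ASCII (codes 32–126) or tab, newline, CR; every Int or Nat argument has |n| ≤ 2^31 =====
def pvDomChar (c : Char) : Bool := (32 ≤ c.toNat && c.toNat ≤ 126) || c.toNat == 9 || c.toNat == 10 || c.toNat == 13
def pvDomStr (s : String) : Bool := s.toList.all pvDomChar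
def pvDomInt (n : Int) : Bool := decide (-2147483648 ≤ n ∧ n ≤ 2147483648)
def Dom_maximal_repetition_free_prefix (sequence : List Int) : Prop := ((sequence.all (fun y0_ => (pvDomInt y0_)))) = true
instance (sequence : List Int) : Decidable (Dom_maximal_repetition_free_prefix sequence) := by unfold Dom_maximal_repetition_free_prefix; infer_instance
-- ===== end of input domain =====

-- B replaces A's repeated all-pairs duplicate scan + recursion on shorter prefixes with one
-- left-to-right pass that stops at the first already-seen element (objective: faster).


-- ===== PORT A =====
-- Literal port of A: length-based small cases, then a quadratic nested index scan for any
-- duplicate pair, recursing on sequence[0:n-1] if one exists.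
def maximal_repetition_free_prefix (sequence : List Int) : List Int :=
  let n : Int := sequence.length
  if n = 0 ∨ n = 1 then sequence
  else if n = 2 then
    (if PySem.List.pyGetD sequence 0 0 ≠ PySem.List.pyGetD sequence 1 0 then sequence
     else PySem.List.slice sequence (some 0) (some 1))
  else if (PySem.List.pyRange 0 n 1).any (fun i =>
            (PySem.List.pyRange 0 n 1).any (fun j =>
              decide (i ≠ j) && PySem.List.pyGetD sequence i 0 == PySem.List.pyGetD sequence j 0)) then
    maximal_repetition_free_prefix (PySem.List.slice sequence (some 0) (some (n - 1)))
  else sequence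
termination_by sequence.length
decreasing_by
  rw [PySem.List.slice_zero_start, PySem.List.slice_to sequence (by omega)]
  simp only [List.length_take]
  omega

-- ===== PORT B =====
-- Port of B: one pass; stop at the first element already in the accumulated prefix.
def mrfpGo (pre : List Int) (rest : List Int) : List Int :=
  match rest with
  | [] => pre
  | x :: xs => if pre.contains x then pre else mrfpGo (pre ++ [x]) xs

def maximal_repetition_free_prefix_alt (sequence : List Int) : List Int :=
  mrfpGo [] sequence

-- ===== PRECONDITION & SPEC =====
def Spec_maximal_repetition_free_prefix (sequence : List Int) (out : List Int) : Prop := out = maximal_repetition_free_prefix_alt sequence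
instance (sequence : List Int) (out : List Int) : Decidable (Spec_maximal_repetition_free_prefix sequence out) := by unfold Spec_maximal_repetition_free_prefix; infer_instance

-- ===== CLAIM (what is proved, stated in full; the proofs are below) =====
def Claim_equal_maximal_repetition_free_prefix : Prop := ∀ (sequence : List Int), Dom_maximal_repetition_free_prefix sequence → Spec_maximal_repetition_free_prefix sequence (maximal_repetition_free_prefix sequence)

-- ===== LEMMAS AND PROOFS =====

-- B returns the whole input when it is duplicate-free.
theorem mrfpGo_of_nodup (rest pre : List Int) (h : (pre ++ rest).Nodup) :
    mrfpGo pre rest = pre ++ rest := by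
  induction rest generalizing pre with
  | nil => simp [mrfpGo]
  | cons x xs ih =>
    have hx : x ∉ pre := by
      intro hmem
      exact (List.disjoint_of_nodup_append h) hmem (by simp)
    rw [mrfpGo]
    simp only [List.contains_eq_mem, hx, decide_false, Bool.false_eq_true, if_false]
    rw [ih (pre ++ [x]) (by simpa using h)]
    simp

-- Dropping the last element does not change B's result when a duplicate exists.
theorem mrfpGo_dropLast (rest pre : List Int) (hpre : pre.Nodup)
    (hne : rest ≠ []) (hdup : ¬ (pre ++ rest).Nodup) :
    mrfpGo pre rest = mrfpGo pre rest.dropLast := by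
  induction rest generalizing pre with
  | nil => exact absurd rfl hne
  | cons x xs ih =>
    by_cases hx : x ∈ pre
    · cases xs with
      | nil => simp [mrfpGo, List.contains_eq_mem, hx]
      | cons y ys => simp [mrfpGo, List.contains_eq_mem, hx]
    · have hpre' : (pre ++ [x]).Nodup := by
        simp [List.nodup_append, hpre]
        exact fun a ha h => hx (h ▸ ha)
      cases xs with
      | nil =>
        exfalso
        apply hdup
        simpa using hpre'
      | cons y ys =>
        have hdup' : ¬ (pre ++ [x] ++ (y :: ys)).Nodup := by
          simpa [List.append_assoc] using hdup
        have hstep : ∀ r : List Int, mrfpGo pre (x :: r) = mrfpGo (pre ++ [x]) r := by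
          intro r
          rw [mrfpGo]
          simp [List.contains_eq_mem, hx]
        simp only [List.dropLast_cons_of_ne_nil (by simp : (y :: ys) ≠ ([] : List Int))]
        rw [hstep, hstep]
        exact ih (pre ++ [x]) hpre' (by simp) hdup' 

theorem alt_dropLast (s : List Int) (hne : s ≠ []) (hdup : ¬ s.Nodup) :
    maximal_repetition_free_prefix_alt s = maximal_repetition_free_prefix_alt s.dropLast := by
  unfold maximal_repetition_free_prefix_alt
  exact mrfpGo_dropLast s [] List.nodup_nil hne (by simpa using hdup)

-- A's nested index scan finds a duplicate pair iff the list is not duplicate-free.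
theorem scan_iff_not_nodup (s : List Int) :
    ((PySem.List.pyRange 0 (s.length : Int) 1).any (fun i =>
        (PySem.List.pyRange 0 (s.length : Int) 1).any (fun j =>
          decide (i ≠ j) && PySem.List.pyGetD s i 0 == PySem.List.pyGetD s j 0)) = true)
      ↔ ¬ s.Nodup := by
  rw [List.any_eq_true]
  constructor
  · rintro ⟨i, hi, hany⟩
    rw [List.any_eq_true] at hany
    obtain ⟨j, hj, hij⟩ := hany
    rw [PySem.List.mem_pyRange_one] at hi hj
    simp only [Bool.and_eq_true, decide_eq_true_eq, beq_iff_eq] at hij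
    obtain ⟨hne, heq⟩ := hij
    rw [PySem.List.pyGetD_eq_getElem s 0 hi.1 hi.2,
        PySem.List.pyGetD_eq_getElem s 0 hj.1 hj.2] at heq
    intro hnd
    have := (List.Nodup.getElem_inj_iff hnd).mp heq
    omega
  · intro hnd
    rw [List.nodup_iff_injective_get] at hnd
    rw [Function.not_injective_iff] at hnd
    obtain ⟨a, b, heq, hab⟩ := hnd
    refine ⟨(a : Nat), ?_, ?_⟩
    · rw [PySem.List.mem_pyRange_one]; omega
    · rw [List.any_eq_true]
      refine ⟨(b : Nat), ?_, ?_⟩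
      · rw [PySem.List.mem_pyRange_one]; omega
      · have ha : ((a : Nat) : Int) < s.length := by exact_mod_cast a.isLt
        have hb : ((b : Nat) : Int) < s.length := by exact_mod_cast b.isLt
        simp only [Bool.and_eq_true, decide_eq_true_eq, beq_iff_eq]
        constructor
        · intro h; apply hab; apply Fin.ext; exact_mod_cast h
        · rw [PySem.List.pyGetD_eq_getElem s 0 (by positivity) ha,
              PySem.List.pyGetD_eq_getElem s 0 (by positivity) hb]
          simpa [List.get_eq_getElem] using heq

theorem mrfp_main (s : List Int) :
    maximal_repetition_free_prefix s = maximal_repetition_free_prefix_alt s := by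
  induction hn : s.length using Nat.strong_induction_on generalizing s with
  | _ n ih =>
  match s with
  | [] =>
    rw [maximal_repetition_free_prefix.eq_def]
    simp [maximal_repetition_free_prefix_alt, mrfpGo]
  | [a] =>
    rw [maximal_repetition_free_prefix.eq_def]
    simp [maximal_repetition_free_prefix_alt, mrfpGo]
  | [a, b] =>
    rw [maximal_repetition_free_prefix.eq_def]
    by_cases hab : a = b
    · subst hab
      norm_num [maximal_repetition_free_prefix_alt, mrfpGo, pysem]
    · norm_num [maximal_repetition_free_prefix_alt, mrfpGo, pysem, hab, Ne.symm hab]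
  | a :: b :: c :: t =>
    rw [maximal_repetition_free_prefix.eq_def]
    have hlen : (a :: b :: c :: t).length = n := hn
    simp only [List.length_cons] at hlen
    have h0 : ¬ (((a :: b :: c :: t).length : Int) = 0 ∨ ((a :: b :: c :: t).length : Int) = 1) := by
      simp only [List.length_cons]; push_cast; omega
    have h2 : ¬ (((a :: b :: c :: t).length : Int) = 2) := by
      simp only [List.length_cons]; push_cast; omega
    rw [if_neg h0, if_neg h2]
    set s3 := a :: b :: c :: t with hs3
    by_cases hdup : s3.Nodup
    · rw [if_neg (by rw [scan_iff_not_nodup]; simpa using hdup)]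
      rw [maximal_repetition_free_prefix_alt, mrfpGo_of_nodup s3 [] (by simpa using hdup)]
      simp
    · rw [if_pos (by rw [scan_iff_not_nodup]; exact hdup)]
      have hslice : PySem.List.slice s3 (some 0) (some ((s3.length : Int) - 1)) = s3.dropLast := by
        rw [PySem.List.slice_zero_start,
            PySem.List.slice_to s3 (by simp only [hs3, List.length_cons]; push_cast; omega)]
        have : ((s3.length : Int) - 1).toNat = s3.length - 1 := by omega
        rw [this, List.dropLast_eq_take]
      rw [hslice]
      rw [ih (s3.dropLast.length) (by simp [hs3]; omega) s3.dropLast (by simp)]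
      exact (alt_dropLast s3 (by simp [hs3]) hdup).symm

-- ===== VERDICT (by name: the statement is the Claim_ definition above) =====
theorem maximal_repetition_free_prefix_spec : Claim_equal_maximal_repetition_free_prefix := by
  intro s _
  unfold Spec_maximal_repetition_free_prefix
  exact mrfp_main s
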